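-- pv_equiv track=rewrite | github.com/paiml/depyler | examples/hard_error_patterns.py | error_recovery_chain
-- ===== SOURCE A (Python) =====
-- from typing import List, Dict, Tuple
--
-- def error_recovery_chain(values: List[int]) -> int:
--     """Process list with error recovery at each step.
--     Negative = error, skip and try next. Returns sum of valid * count_valid."""
--     valid_count: int = 0
--     valid_sum: int = 0
--     consecutive_errors: int = 0
--     for v in values:
--         if v < 0:
--             consecutive_errors = consecutive_errors + 1
--             if consecutive_errors >= 3:
--                 return -1
--         else:
--             consecutive_errors = 0
--             valid_count = valid_count + 1
--             valid_sum = valid_sum + v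
--     if valid_count == 0:
--         return 0
--     return valid_sum * valid_count
-- ===== SOURCE B (Python) =====
-- def error_recovery_chain(values):
--     n = len(values)
--     if any(values[i] < 0 and values[i + 1] < 0 and values[i + 2] < 0
--            for i in range(n - 2)):
--         return -1
--     valid = [v for v in values if v >= 0]
--     if not valid:
--         return 0
--     return sum(valid) * len(valid)
-- ===== Notes on version B (the rewrite author's own statement) =====
-- stated objective: alternative
-- what changed: Replaces A's single running-counter loop with a two-phase scan: an indexed window check for three consecutive negatives (abort), then a filter of the non-negative values with sum*len; this works because A discards its partial sum on abort.
import Mathlib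
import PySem

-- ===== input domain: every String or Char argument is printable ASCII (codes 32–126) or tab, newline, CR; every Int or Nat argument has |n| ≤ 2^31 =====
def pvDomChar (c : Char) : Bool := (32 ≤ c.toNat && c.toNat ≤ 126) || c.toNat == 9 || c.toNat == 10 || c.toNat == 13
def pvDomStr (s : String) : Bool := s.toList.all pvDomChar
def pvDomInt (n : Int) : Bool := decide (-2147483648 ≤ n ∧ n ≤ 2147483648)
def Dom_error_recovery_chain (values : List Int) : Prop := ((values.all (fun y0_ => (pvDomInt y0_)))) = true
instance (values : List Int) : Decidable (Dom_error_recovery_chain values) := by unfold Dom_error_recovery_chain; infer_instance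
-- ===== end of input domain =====

-- B replaces A's running-counter loop by a two-phase scan (windowed abort check, then
-- a filter with sum*len); same return value on every input, no speed claim.

-- ===== PORT A =====
-- A's loop with early return, state = (valid_count, valid_sum, consecutive_errors)
def ercLoopA : List Int → Int → Int → Int → Int
  | [], valid_count, valid_sum, _ =>
      if valid_count = 0 then 0 else valid_sum * valid_count
  | v :: rest, valid_count, valid_sum, consecutive_errors =>
      if v < 0 then
        if consecutive_errors + 1 ≥ 3 then -1
        else ercLoopA rest valid_count valid_sum (consecutive_errors + 1)
      else ercLoopA rest (valid_count + 1) (valid_sum + v) 0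

def error_recovery_chain (values : List Int) : Int :=
  ercLoopA values 0 0 0

-- ===== PORT B =====
-- any(values[i] < 0 and values[i+1] < 0 and values[i+2] < 0 for i in range(n - 2));
-- indices i, i+1, i+2 are always in range, so getD is exact here
def ercHasWindow (values : List Int) : Bool :=
  (List.range (values.length - 2)).any (fun i =>
    decide (values.getD i 0 < 0) && decide (values.getD (i + 1) 0 < 0) &&
      decide (values.getD (i + 2) 0 < 0))

def error_recovery_chain_alt (values : List Int) : Int :=
  if ercHasWindow values then -1
  else
    let valid := values.filter (fun v => 0 ≤ v)
    if valid = [] then 0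
    else valid.sum * (valid.length : Int)

-- ===== PRECONDITION & SPEC =====
def Spec_error_recovery_chain (values : List Int) (out : Int) : Prop := out = error_recovery_chain_alt values
instance (values : List Int) (out : Int) : Decidable (Spec_error_recovery_chain values out) := by unfold Spec_error_recovery_chain; infer_instance

-- ===== CLAIM (what is proved, stated in full; the proofs are below) =====
def Claim_equal_error_recovery_chain : Prop := ∀ (values : List Int), Dom_error_recovery_chain values → Spec_error_recovery_chain values (error_recovery_chain values)

-- ===== LEMMAS AND PROOFS =====

-- abort predicate of A's loop, as a function of the pending error counter
def ercAux : Int → List Int → Bool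
  | _, [] => false
  | e, v :: rest =>
      if v < 0 then (if e + 1 ≥ 3 then true else ercAux (e + 1) rest)
      else ercAux 0 rest

-- windowed "three consecutive negatives" predicate, recursively
def ercHasT : List Int → Bool
  | a :: b :: c :: rest => (decide (a < 0) && decide (b < 0) && decide (c < 0)) || ercHasT (b :: c :: rest)
  | _ => false

def ercP1 (t : List Int) : Bool :=
  match t with | v :: _ => decide (v < 0) | [] => false

def ercP2 (t : List Int) : Bool :=
  match t with | a :: b :: _ => decide (a < 0) && decide (b < 0) | _ => false

-- A's loop equals: abort check, then closed finish from the filtered suffix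
lemma ercLoopA_char (t : List Int) : ∀ (c s e : Int),
    ercLoopA t c s e =
      if ercAux e t then -1
      else
        let valid := t.filter (fun v => 0 ≤ v)
        if c + (valid.length : Int) = 0 then 0 else (s + valid.sum) * (c + (valid.length : Int)) := by
  induction t with
  | nil => intro c s e; simp [ercLoopA, ercAux]
  | cons v rest ih =>
      intro c s e
      by_cases hv : v < 0
      · by_cases he : e + 1 ≥ 3
        · simp [ercLoopA, ercAux, hv, he]
        · simp only [ercLoopA, ercAux, if_pos hv, if_neg he, ih]
          have : ¬ (0 ≤ v) := by omega
          simp [this]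
      · have h0 : (0:Int) ≤ v := by omega
        simp only [ercLoopA, ercAux, if_neg hv, ih]
        have hf : (v :: rest).filter (fun v => decide (0 ≤ v)) = v :: rest.filter (fun v => decide (0 ≤ v)) := by
          simp [List.filter, h0]
        simp only [hf, List.length_cons, List.sum_cons]
        push_cast
        have hc : c + 1 + ((rest.filter (fun v => decide (0 ≤ v))).length : Int)
            = c + (((rest.filter (fun v => decide (0 ≤ v))).length : Int) + 1) := by ring
        rw [hc]
        split_ifs <;> ring

lemma ercP1_cons (v : Int) (rest : List Int) : ercP1 (v :: rest) = decide (v < 0) := rfl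

lemma ercP2_cons (v : Int) (rest : List Int) :
    ercP2 (v :: rest) = (decide (v < 0) && ercP1 rest) := by
  cases rest <;> simp [ercP2, ercP1]

lemma ercHasT_cons (v : Int) (rest : List Int) :
    ercHasT (v :: rest) = ((decide (v < 0) && ercP2 rest) || ercHasT rest) := by
  match rest with
  | [] => simp [ercHasT, ercP2]
  | [b] => simp [ercHasT, ercP2]
  | b :: c :: r => simp [ercHasT, ercP2, Bool.and_assoc]

lemma ercP2_imp_P1 (t : List Int) : ercP2 t = true → ercP1 t = true := by
  cases t with
  | nil => simp [ercP2, ercP1]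
  | cons a r => cases r <;> simp_all [ercP2, ercP1]

-- ercAux in terms of the window predicate and the pending prefix
lemma ercAux_char (t : List Int) :
    ercAux 0 t = ercHasT t ∧ ercAux 1 t = (ercP2 t || ercHasT t) ∧ ercAux 2 t = (ercP1 t || ercHasT t) := by
  induction t with
  | nil => simp [ercAux, ercHasT, ercP1, ercP2]
  | cons v rest ih =>
      obtain ⟨ih0, ih1, ih2⟩ := ih
      have e0 : ercAux 0 (v :: rest) = (if v < 0 then ercAux 1 rest else ercAux 0 rest) := by
        simp [ercAux]
      have e1 : ercAux 1 (v :: rest) = (if v < 0 then ercAux 2 rest else ercAux 0 rest) := by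
        simp [ercAux]
      have e2 : ercAux 2 (v :: rest) = (if v < 0 then true else ercAux 0 rest) := by
        simp [ercAux]
      by_cases hv : v < 0
      · refine ⟨?_, ?_, ?_⟩
        · rw [e0, if_pos hv, ih1, ercHasT_cons]; simp [hv]
        · rw [e1, if_pos hv, ih2, ercHasT_cons, ercP2_cons]
          simp only [hv, decide_true, Bool.true_and]
          cases hp2 : ercP2 rest
          · simp
          · have := ercP2_imp_P1 rest hp2; simp [this]
        · rw [e2, if_pos hv, ercP1_cons]; simp [hv]
      · refine ⟨?_, ?_, ?_⟩
        · rw [e0, if_neg hv, ih0, ercHasT_cons]; simp [hv]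
        · rw [e1, if_neg hv, ih0, ercHasT_cons, ercP2_cons]; simp [hv]
        · rw [e2, if_neg hv, ih0, ercHasT_cons, ercP1_cons]; simp [hv]

lemma ercHasWindow_eq (values : List Int) : ercHasWindow values = ercHasT values := by
  induction values with
  | nil => simp [ercHasWindow, ercHasT]
  | cons v t ih =>
      match t, ih with
      | [], _ => simp [ercHasWindow, ercHasT]
      | [b], _ => simp [ercHasWindow, ercHasT]
      | b :: c :: r, ih =>
        have hlen : (v :: b :: c :: r).length - 2 = ((b :: c :: r).length - 2) + 1 := by
          simp
        rw [ercHasWindow, hlen, List.range_succ_eq_map]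
        simp only [List.any_cons, List.any_map, Function.comp_def, List.getD_cons_succ,
          List.getD_cons_zero, Nat.succ_eq_add_one]
        rw [ercHasT]
        rw [← ih]
        rfl

-- ===== VERDICT (by name: the statement is the Claim_ definition above) =====
theorem error_recovery_chain_spec : Claim_equal_error_recovery_chain := by
  intro values _
  unfold Spec_error_recovery_chain error_recovery_chain error_recovery_chain_alt
  rw [ercLoopA_char, (ercAux_char values).1, ← ercHasWindow_eq]
  by_cases h : ercHasWindow values = true
  · simp [h]
  · simp only [h, Bool.false_eq_true, if_false, zero_add]
    by_cases he : values.filter (fun v => decide (0 ≤ v)) = []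
    · simp [he]
    · simp [he]
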